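-- pv_equiv track=rewrite | github.com/dzhang3701/abacal | abacal.py | _top_op_binary
-- ===== SOURCE A (Python) =====
-- def _top_op_binary(expr):
--     """Return the root-level operator only if the expression is strictly binary
--     (exactly one depth-0 operator of the dominant type, i.e. exactly two top-level terms).
--     Returns None for A+B+C, A+B-C, A*B*C, etc."""
--     s = expr.strip()
--     depth, add_ops, mul_ops = 0, [], []
--     for i, ch in enumerate(s):
--         if ch == '(':   depth += 1
--         elif ch == ')': depth -= 1
--         elif depth == 0:
--             if ch in '+-' and i > 0: add_ops.append(ch)
--             elif ch in '*/':         mul_ops.append(ch)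
--     if add_ops:
--         return add_ops[-1] if len(add_ops) == 1 else None
--     if mul_ops:
--         return mul_ops[-1] if len(mul_ops) == 1 else None
--     return None
-- ===== SOURCE B (Python) =====
-- def _top_op_binary(expr):
--     """Return the root-level operator only if the expression is strictly binary."""
--     s = expr.strip()
--
--     def split_top(ops, sign_ok):
--         # split s into top-level terms at depth-0 occurrences of ops;
--         # a leading '+'/'-' is a sign, not a separator, when sign_ok
--         terms, seps, depth, start = [], [], 0, 0
--         for i, ch in enumerate(s):
--             if ch == '(':
--                 depth += 1
--             elif ch == ')':
--                 depth -= 1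
--             elif depth == 0 and ch in ops and not (sign_ok and i == 0):
--                 terms.append(s[start:i])
--                 seps.append(ch)
--                 start = i + 1
--         terms.append(s[start:])
--         return terms, seps
--
--     terms, seps = split_top('+-', True)
--     if not seps:
--         terms, seps = split_top('*/', False)
--     if seps:
--         return seps[0] if len(terms) == 2 else None
--     return None
-- ===== Notes on version B (the rewrite author's own statement) =====
-- stated objective: alternative
-- what changed: B splits the stripped expression into top-level terms (first at '+'/'-' with the leading sign kept, then, if no additive separator exists, at '*'/'/') and returns the single separator exactly when there are two terms, instead of A's single pass accumulating two operator lists and testing their lengths.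
import Mathlib
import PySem

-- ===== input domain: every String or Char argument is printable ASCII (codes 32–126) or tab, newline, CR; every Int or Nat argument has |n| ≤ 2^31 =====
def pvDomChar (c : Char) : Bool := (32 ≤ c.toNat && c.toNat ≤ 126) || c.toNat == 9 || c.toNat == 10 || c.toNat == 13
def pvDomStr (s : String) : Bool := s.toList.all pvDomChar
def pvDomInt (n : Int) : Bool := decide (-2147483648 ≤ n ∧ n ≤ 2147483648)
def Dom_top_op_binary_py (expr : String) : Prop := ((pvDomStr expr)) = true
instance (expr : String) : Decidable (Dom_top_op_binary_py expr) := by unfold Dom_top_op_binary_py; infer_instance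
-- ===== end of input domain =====

-- B replaces A's one-pass double operator accumulation by a top-level term splitter
-- (add separators first, else mul separators) with a two-terms test: alternative decomposition, same cost.

-- ===== PORT A =====
-- state: (depth, add_ops, mul_ops)
def aStep (st : Int × List Char × List Char) (p : Int × Char) : Int × List Char × List Char :=
  if p.2 = '(' then (st.1 + 1, st.2.1, st.2.2)
  else if p.2 = ')' then (st.1 - 1, st.2.1, st.2.2)
  else if st.1 = 0 then
    if p.2 ∈ ['+', '-'] ∧ p.1 > 0 then (st.1, st.2.1 ++ [p.2], st.2.2)
    else if p.2 ∈ ['*', '/'] then (st.1, st.2.1, st.2.2 ++ [p.2])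
    else st
  else st

def top_op_binary_py (expr : String) : Option String :=
  let s := PySem.Chars.strip expr.toList
  let r := (PySem.List.enumerate s).foldl aStep (0, [], [])
  if r.2.1 ≠ [] then
    if r.2.1.length = 1 then some (String.ofList [r.2.1.getLast!]) else none
  else if r.2.2 ≠ [] then
    if r.2.2.length = 1 then some (String.ofList [r.2.2.getLast!]) else none
  else none

-- ===== PORT B =====
-- state: (terms, seps, depth, start)
def bStep (s ops : List Char) (signOk : Bool) (st : List (List Char) × List Char × Int × Int)
    (p : Int × Char) : List (List Char) × List Char × Int × Int :=
  if p.2 = '(' then (st.1, st.2.1, st.2.2.1 + 1, st.2.2.2)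
  else if p.2 = ')' then (st.1, st.2.1, st.2.2.1 - 1, st.2.2.2)
  else if st.2.2.1 = 0 ∧ p.2 ∈ ops ∧ ¬(signOk = true ∧ p.1 = 0) then
    (st.1 ++ [PySem.List.slice s (some st.2.2.2) (some p.1)], st.2.1 ++ [p.2], st.2.2.1, p.1 + 1)
  else st

def splitTop (s ops : List Char) (signOk : Bool) : List (List Char) × List Char :=
  let r := (PySem.List.enumerate s).foldl (bStep s ops signOk) ([], [], 0, 0)
  (r.1 ++ [PySem.List.slice s (some r.2.2.2) none], r.2.1)

def top_op_binary_py_alt (expr : String) : Option String :=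
  let s := PySem.Chars.strip expr.toList
  let ts1 := splitTop s ['+', '-'] true
  let ts := if ts1.2 = [] then splitTop s ['*', '/'] false else ts1
  if ts.2 ≠ [] then
    if ts.1.length = 2 then some (String.ofList [ts.2.head!]) else none
  else none

-- ===== PRECONDITION & SPEC =====
def Spec_top_op_binary_py (expr : String) (out : Option String) : Prop := out = top_op_binary_py_alt expr
instance (expr : String) (out : Option String) : Decidable (Spec_top_op_binary_py expr out) := by unfold Spec_top_op_binary_py; infer_instance

-- ===== CLAIM (what is proved, stated in full; the proofs are below) =====
def Claim_equal_top_op_binary_py : Prop := ∀ (expr : String), Dom_top_op_binary_py expr → Spec_top_op_binary_py expr (top_op_binary_py expr)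

-- ===== LEMMAS AND PROOFS =====

-- A's operator lists coincide with B's separator lists (for the matching ops / signOk),
-- when the three folds start at the same depth and operator/separator lists.
lemma fold_rel (s : List Char) (l : List (Int × Char)) (hl : ∀ p ∈ l, 0 ≤ p.1)
    (d : Int) (add mul : List Char) (ta tm : List (List Char)) (sa sm : Int) :
    (l.foldl aStep (d, add, mul)).2.1 = (l.foldl (bStep s ['+', '-'] true) (ta, add, d, sa)).2.1 ∧
    (l.foldl aStep (d, add, mul)).2.2 = (l.foldl (bStep s ['*', '/'] false) (tm, mul, d, sm)).2.1 := by
  induction l generalizing d add mul ta tm sa sm with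
  | nil => simp
  | cons p l ih =>
    have hp : 0 ≤ p.1 := hl p (List.mem_cons_self ..)
    have hl' : ∀ q ∈ l, 0 ≤ q.1 := fun q hq => hl q (List.mem_cons_of_mem _ hq)
    obtain ⟨i, c⟩ := p
    dsimp only at hp
    simp only [List.foldl_cons]
    by_cases h1 : c = '('
    · simp [aStep, bStep, h1]; exact ih hl' ..
    by_cases h2 : c = ')'
    · simp [aStep, bStep, h2]; exact ih hl' ..
    by_cases hd : d = 0
    · by_cases h3 : c = '+'
      · by_cases hi : i = 0
        · simp [aStep, bStep, hd, h3, hi]; exact ih hl' ..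
        · have hgt : 0 < i := lt_of_le_of_ne hp (Ne.symm hi)
          simp [aStep, bStep, hd, h3, hi, hgt]; exact ih hl' ..
      by_cases h4 : c = '-'
      · by_cases hi : i = 0
        · simp [aStep, bStep, hd, h4, hi]; exact ih hl' ..
        · have hgt : 0 < i := lt_of_le_of_ne hp (Ne.symm hi)
          simp [aStep, bStep, hd, h4, hi, hgt]; exact ih hl' ..
      by_cases h5 : c = '*'
      · simp [aStep, bStep, hd, h5]; exact ih hl' ..
      by_cases h6 : c = '/'
      · simp [aStep, bStep, hd, h6]; exact ih hl' ..
      · simp [aStep, bStep, h1, h2, hd, h3, h4, h5, h6]; exact ih hl' ..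
    · simp [aStep, bStep, h1, h2, hd]; exact ih hl' ..

-- the splitter always keeps one more pending term than separators appended
lemma split_len (s ops : List Char) (b : Bool) (l : List (Int × Char))
    (ta : List (List Char)) (se : List Char) (d st : Int) :
    (l.foldl (bStep s ops b) (ta, se, d, st)).1.length + se.length
      = ta.length + (l.foldl (bStep s ops b) (ta, se, d, st)).2.1.length := by
  induction l generalizing ta se d st with
  | nil => simp
  | cons p l ih =>
    simp only [List.foldl_cons, bStep]
    split_ifs
    · exact ih ..
    · exact ih ..
    · have h := ih (ta ++ [PySem.List.slice s (some st) (some p.1)]) (se ++ [p.2]) d (p.1 + 1)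
      simp only [List.length_append, List.length_cons, List.length_nil] at h
      omega
    · exact ih ..

lemma enum_nonneg (s : List Char) : ∀ p ∈ PySem.List.enumerate s 0, 0 ≤ p.1 := by
  intro p hp
  rcases (PySem.List.mem_enumerate_iff s 0 p).mp hp with ⟨k, hk, rfl⟩
  positivity

-- both final decision trees, spelt out on the stripped character list
lemma core (s : List Char) :
    (let r := (PySem.List.enumerate s).foldl aStep (0, [], [])
     if r.2.1 ≠ [] then
       if r.2.1.length = 1 then some (String.ofList [r.2.1.getLast!]) else none
     else if r.2.2 ≠ [] then
       if r.2.2.length = 1 then some (String.ofList [r.2.2.getLast!]) else none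
     else none)
    =
    (let ts1 := splitTop s ['+', '-'] true
     let ts := if ts1.2 = [] then splitTop s ['*', '/'] false else ts1
     if ts.2 ≠ [] then
       if ts.1.length = 2 then some (String.ofList [ts.2.head!]) else none
     else none) := by
  simp only [splitTop]
  obtain ⟨hadd, hmul⟩ := fold_rel s (PySem.List.enumerate s 0) (enum_nonneg s) 0 [] [] [] [] 0 0
  have hlen1 := split_len s ['+', '-'] true (PySem.List.enumerate s 0) [] [] 0 0
  have hlen2 := split_len s ['*', '/'] false (PySem.List.enumerate s 0) [] [] 0 0
  set rA := (PySem.List.enumerate s 0).foldl aStep (0, [], []) with hrA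
  set r1 := (PySem.List.enumerate s 0).foldl (bStep s ['+', '-'] true) ([], [], 0, 0) with hr1
  set r2 := (PySem.List.enumerate s 0).foldl (bStep s ['*', '/'] false) ([], [], 0, 0) with hr2
  simp only [List.length_nil, Nat.add_zero, Nat.zero_add] at hlen1 hlen2
  rcases hc : rA.2.1 with _ | ⟨c, cs⟩
  · -- no add operators / separators
    have h1 : r1.2.1 = [] := by rw [← hadd, hc]
    simp only [h1, ne_eq, not_true_eq_false, if_false, if_true, List.length_append]
    rcases hm : rA.2.2 with _ | ⟨d, ds⟩
    · have h2 : r2.2.1 = [] := by rw [← hmul, hm]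
      simp [h2]
    · have h2 : r2.2.1 = d :: ds := by rw [← hmul, hm]
      have h2l : r2.1.length = ds.length + 1 := by rw [hlen2, h2]; simp
      rcases ds with _ | ⟨d2, ds2⟩ <;> simp [h2, h2l]
  · -- add separators exist: B keeps the first split
    have h1 : r1.2.1 = c :: cs := by rw [← hadd, hc]
    have h1l : r1.1.length = cs.length + 1 := by rw [hlen1, h1]; simp
    rcases cs with _ | ⟨c2, cs2⟩ <;> simp [h1, h1l]

-- ===== VERDICT (by name: the statement is the Claim_ definition above) =====
theorem top_op_binary_py_spec : Claim_equal_top_op_binary_py := by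
  intro expr _
  unfold Spec_top_op_binary_py top_op_binary_py top_op_binary_py_alt
  exact core (PySem.Chars.strip expr.toList)
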